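-- pv_equiv track=rewrite | github.com/Dostoyevsky7/BMI3_miniproject | scripts/repeatfinder.py | chain_all_buckets_local
-- ===== SOURCE A (Python) =====
-- def chain_all_buckets_local(buckets, min_seeds, max_gap):
--     """
--     Chain seeds within each diagonal bucket to form contiguous repeat regions.
--
--     A "chain" is a sequence of collinear seeds with small gaps between them,
--     indicating a single repeat region. This function uses a simple greedy
--     algorithm to extend chains as long as gaps remain small.
--
--     Args:
--         buckets: Dictionary from bucket_pairs_by_diagonal_local
--         min_seeds: Minimum number of seeds required in a valid chain
--         max_gap: Maximum allowed gap between consecutive seeds (bp)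
--
--     Returns:
--         List of (orientation, chain_pairs) tuples
--         where chain_pairs is a list of (pos1, pos2) coordinates
--
--     Algorithm (per bucket):
--         1. Sort pairs by position (ensures sequential processing)
--         2. Start a new chain with first pair
--         3. For each subsequent pair:
--            - If gap from last pair < max_gap: extend current chain
--            - Else: save current chain (if >= min_seeds), start new chain
--         4. Save final chain
--
--     Rationale:
--         Simple greedy chaining is fast and works well because:
--         - Seeds are already grouped by diagonal (from bucketing)
--         - True repeats have small, relatively uniform gaps
--         - Complex DP algorithms are overkill for this filtered data
--     """
--     all_chains = []
--     for (ori_flag, _), pairs in buckets.items():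
--         pairs.sort()  # Sort by position for sequential chaining
--
--         current_chain = [pairs[0]]
--         for p in pairs[1:]:
--             pos1, pos2 = p
--             last_pos1, last_pos2 = current_chain[-1]
--
--             # Check if gap is small enough to extend current chain
--             if abs(pos1 - last_pos1) <= max_gap and abs(pos2 - last_pos2) <= max_gap:
--                 current_chain.append(p)
--             else:
--                 # Gap too large: save current chain if long enough, start new chain
--                 if len(current_chain) >= min_seeds:
--                     all_chains.append((ori_flag, current_chain))
--                 current_chain = [p]
--
--         # Don't forget to save the last chain
--         if len(current_chain) >= min_seeds:
--             all_chains.append((ori_flag, current_chain))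
--
--     return all_chains
-- ===== SOURCE B (Python) =====
-- def chain_all_buckets_local(buckets, min_seeds, max_gap):
--     all_chains = []
--     for (ori_flag, _), pairs in buckets.items():
--         pairs.sort()  # same in-place sort as the original
--         n = len(pairs)
--         # boundary table: indices where the gap to the previous seed is too large
--         cuts = [i for i in range(1, n)
--                 if abs(pairs[i][0] - pairs[i - 1][0]) > max_gap
--                 or abs(pairs[i][1] - pairs[i - 1][1]) > max_gap]
--         bounds = [0] + cuts + [n]
--         all_chains.extend((ori_flag, pairs[a:b])
--                           for a, b in zip(bounds, bounds[1:])
--                           if b - a >= min_seeds)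
--     return all_chains
-- ===== Notes on version B (the rewrite author's own statement) =====
-- stated objective: alternative
-- what changed: A grows chains incrementally with a current-chain accumulator and emits each chain inline when a large gap or the end of the bucket is reached; B instead makes one indexed pass collecting a boundary table of large-gap positions, slices the sorted list into contiguous segments at those boundaries, and keeps the segments of length >= min_seeds.
import Mathlib
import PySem

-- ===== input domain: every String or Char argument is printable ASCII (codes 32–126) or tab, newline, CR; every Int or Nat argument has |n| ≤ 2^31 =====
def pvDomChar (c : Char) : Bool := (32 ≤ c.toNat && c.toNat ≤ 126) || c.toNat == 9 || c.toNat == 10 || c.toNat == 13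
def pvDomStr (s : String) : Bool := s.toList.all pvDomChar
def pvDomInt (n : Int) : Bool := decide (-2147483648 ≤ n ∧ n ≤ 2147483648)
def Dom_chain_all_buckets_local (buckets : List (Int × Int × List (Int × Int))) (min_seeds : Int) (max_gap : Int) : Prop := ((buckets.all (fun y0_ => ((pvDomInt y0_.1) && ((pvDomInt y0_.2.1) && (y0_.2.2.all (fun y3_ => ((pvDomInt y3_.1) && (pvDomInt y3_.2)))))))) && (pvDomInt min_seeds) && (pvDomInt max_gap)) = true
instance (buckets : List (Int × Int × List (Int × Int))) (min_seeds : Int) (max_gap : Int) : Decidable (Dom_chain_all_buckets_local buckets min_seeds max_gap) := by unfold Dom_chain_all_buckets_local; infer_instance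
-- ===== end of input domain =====

-- B replaces A's incremental current-chain accumulator by a boundary table of large-gap
-- positions plus a slicing pass (alternative decomposition; equivalence is about the return
-- value — both Pythons sort each bucket's list in place the same way).


-- ===== PORT A =====
def chain_all_buckets_local (buckets : List (Int × Int × List (Int × Int))) (min_seeds : Int) (max_gap : Int) : List (Int × (List (Int × Int))) :=
  buckets.foldl (fun all_chains bkt =>
    let ori_flag := bkt.1
    -- pairs.sort(): Python sorts the (pos1, pos2) tuples lexicographically
    let pairs := PySem.List.sorted2 bkt.2.2 (fun p => p.1) (fun p => p.2)
    match pairs with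
    | [] => all_chains   -- Python raises IndexError at pairs[0]; excluded by Pre_
    | p0 :: rest =>
      let st := rest.foldl (fun (st : List (Int × Int) × List (Int × (List (Int × Int)))) p =>
        let last := PySem.List.pyGetD st.1 (-1) (0, 0)   -- current_chain[-1]
        if |p.1 - last.1| ≤ max_gap ∧ |p.2 - last.2| ≤ max_gap then
          (st.1 ++ [p], st.2)
        else
          if min_seeds ≤ (st.1.length : Int) then ([p], st.2 ++ [(ori_flag, st.1)])
          else ([p], st.2)) ([p0], all_chains)
      if min_seeds ≤ (st.1.length : Int) then st.2 ++ [(ori_flag, st.1)] else st.2) []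

-- ===== PORT B =====
def chain_all_buckets_local_alt (buckets : List (Int × Int × List (Int × Int))) (min_seeds : Int) (max_gap : Int) : List (Int × (List (Int × Int))) :=
  buckets.foldl (fun all_chains bkt =>
    let ori_flag := bkt.1
    let pairs := PySem.List.sorted2 bkt.2.2 (fun p => p.1) (fun p => p.2)
    let n : Int := (pairs.length : Int)
    -- boundary table: indices where the gap to the previous seed is too large
    let cuts := (PySem.List.pyRange 1 n 1).filter (fun i =>
      decide (max_gap < |(PySem.List.pyGetD pairs i (0, 0)).1 - (PySem.List.pyGetD pairs (i - 1) (0, 0)).1| ∨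
              max_gap < |(PySem.List.pyGetD pairs i (0, 0)).2 - (PySem.List.pyGetD pairs (i - 1) (0, 0)).2|))
    let bounds := 0 :: cuts ++ [n]
    all_chains ++ ((bounds.zip (bounds.drop 1)).filter (fun ab => decide (min_seeds ≤ ab.2 - ab.1))).map
      (fun ab => (ori_flag, PySem.List.slice pairs (some ab.1) (some ab.2)))) []

-- ===== PRECONDITION & SPEC =====
-- Pre_ excludes buckets with an empty pairs list, on which A raises IndexError (pairs[0]),
-- and duplicate (ori_flag, diagonal) keys, which cannot occur in A's Python dict input.
def Pre_chain_all_buckets_local (buckets : List (Int × Int × List (Int × Int))) (_min_seeds : Int) (_max_gap : Int) : Prop :=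
  (∀ b ∈ buckets, b.2.2 ≠ []) ∧ List.Pairwise (fun a b => (a.1, a.2.1) ≠ (b.1, b.2.1)) buckets
instance (buckets : List (Int × Int × List (Int × Int))) (min_seeds : Int) (max_gap : Int) : Decidable (Pre_chain_all_buckets_local buckets min_seeds max_gap) := by unfold Pre_chain_all_buckets_local; infer_instance
def pvWitness_chain_all_buckets_local : (List (Int × Int × List (Int × Int))) × Int × Int :=
  ([(1, 0, [(0, 0), (2, 1), (100, 100)])], 2, 5)

def Spec_chain_all_buckets_local (buckets : List (Int × Int × List (Int × Int))) (min_seeds : Int) (max_gap : Int) (out : List (Int × (List (Int × Int)))) : Prop := out = chain_all_buckets_local_alt buckets min_seeds max_gap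
instance (buckets : List (Int × Int × List (Int × Int))) (min_seeds : Int) (max_gap : Int) (out : List (Int × (List (Int × Int)))) : Decidable (Spec_chain_all_buckets_local buckets min_seeds max_gap out) := by unfold Spec_chain_all_buckets_local; infer_instance

-- ===== CLAIM (what is proved, stated in full; the proofs are below) =====
def Claim_equal_chain_all_buckets_local : Prop := ∀ (buckets : List (Int × Int × List (Int × Int))) (min_seeds : Int) (max_gap : Int), Dom_chain_all_buckets_local buckets min_seeds max_gap → Pre_chain_all_buckets_local buckets min_seeds max_gap → Spec_chain_all_buckets_local buckets min_seeds max_gap (chain_all_buckets_local buckets min_seeds max_gap)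

-- ===== LEMMAS AND PROOFS =====

-- greedy run: the longest prefix whose every element is close to its predecessor
def pvRun (g : Int) (prev : Int × Int) : List (Int × Int) → List (Int × Int) × List (Int × Int)
  | [] => ([], [])
  | q :: qs =>
      if |q.1 - prev.1| ≤ g ∧ |q.2 - prev.2| ≤ g then
        ((pvRun g q qs).1.cons q, (pvRun g q qs).2)
      else ([], q :: qs)

theorem pvRun_append (g : Int) : ∀ (prev : Int × Int) (l : List (Int × Int)),
    (pvRun g prev l).1 ++ (pvRun g prev l).2 = l := by
  intro prev l
  induction l generalizing prev with
  | nil => simp [pvRun]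
  | cons q qs ih => by_cases h : |q.1 - prev.1| ≤ g ∧ |q.2 - prev.2| ≤ g <;> simp [pvRun, h, ih q]

theorem pvRun_snd_length (g : Int) (prev : Int × Int) (l : List (Int × Int)) :
    (pvRun g prev l).2.length ≤ l.length := by
  have := congrArg List.length (pvRun_append g prev l)
  simp [List.length_append] at this; omega

-- the chains of a list: maximal runs of consecutive close elements
def pvSplit (g : Int) : List (Int × Int) → List (List (Int × Int))
  | [] => []
  | p :: rest => (p :: (pvRun g p rest).1) :: pvSplit g (pvRun g p rest).2
termination_by l => l.length
decreasing_by
  have := pvRun_snd_length g p rest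
  simp; omega

-- keep the chains that are long enough, tagged with the orientation flag
def pvEmit (m ori : Int) (cs : List (List (Int × Int))) : List (Int × (List (Int × Int))) :=
  (cs.filter (fun c => decide (m ≤ (c.length : Int)))).map (fun c => (ori, c))

-- the cut positions, recursively (Nat world)
def pvCutsN (g : Int) : List (Int × Int) → List Nat
  | [] => []
  | p :: rest =>
      if (pvRun g p rest).2 = [] then []
      else ((pvRun g p rest).1.length + 1) ::
           (pvCutsN g (pvRun g p rest).2).map (· + ((pvRun g p rest).1.length + 1))
termination_by l => l.length
decreasing_by
  have := pvRun_snd_length g p rest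
  simp; omega

-- the cut positions as port B computes them
def pvCutsI (g : Int) (sp : List (Int × Int)) : List Int :=
  (PySem.List.pyRange 1 (sp.length : Int) 1).filter (fun i =>
    decide (g < |(PySem.List.pyGetD sp i (0, 0)).1 - (PySem.List.pyGetD sp (i - 1) (0, 0)).1| ∨
            g < |(PySem.List.pyGetD sp i (0, 0)).2 - (PySem.List.pyGetD sp (i - 1) (0, 0)).2|))

theorem pvRange_shift (a b : Int) : PySem.List.pyRange (a+1) (b+1) 1 = (PySem.List.pyRange a b 1).map (· + 1) := by
  simp only [PySem.List.pyRange_one, List.map_map]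
  have : (b + 1 - (a + 1)) = b - a := by ring
  rw [this]
  exact List.map_congr_left (fun k _ => by simp [Function.comp]; ring)

theorem pvGetD_cons_shift (x : Int × Int) (tl : List (Int × Int)) (i : Int) (d : Int × Int) (h0 : 0 ≤ i) (h1 : i < tl.length) :
    PySem.List.pyGetD (x :: tl) (i+1) d = PySem.List.pyGetD tl i d := by
  rw [PySem.List.pyGetD_eq_getElem (x :: tl) d (by omega) (by simp; omega),
      PySem.List.pyGetD_eq_getElem tl d h0 h1]
  have h : (i + 1).toNat = i.toNat + 1 := by omega
  simp [h]

theorem cutsI_eq_cutsN (g : Int) : ∀ (sp : List (Int × Int)),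
    pvCutsI g sp = (pvCutsN g sp).map (fun k : Nat => (k : Int)) := by
  intro sp
  induction sp with
  | nil => simp [pvCutsI, pvCutsN, PySem.List.pyRange_one_eq_nil]
  | cons x tl ih =>
    match tl with
    | [] =>
      simp [pvCutsI, pvCutsN, pvRun, PySem.List.pyRange_one_eq_nil]
    | y :: t =>
      -- LHS: split the index range
      have hn : (1:Int) < ((x :: y :: t).length : Int) := by simp
      rw [pvCutsI, PySem.List.pyRange_one_cons hn]
      have hcast : ((x :: y :: t).length : Int) = ((y :: t).length : Int) + 1 := by simp
      rw [hcast, show (1:Int) + 1 = 1 + 1 by rfl, pvRange_shift 1 ((y :: t).length : Int)]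
      rw [List.filter_cons, List.filter_map]
      -- the shifted predicate coincides with the tail's predicate
      have hcong : ∀ i ∈ PySem.List.pyRange 1 ((y :: t).length : Int) 1,
          ((fun i => decide (g < |(PySem.List.pyGetD (x :: y :: t) i (0, 0)).1 - (PySem.List.pyGetD (x :: y :: t) (i - 1) (0, 0)).1| ∨
            g < |(PySem.List.pyGetD (x :: y :: t) i (0, 0)).2 - (PySem.List.pyGetD (x :: y :: t) (i - 1) (0, 0)).2|)) ∘ (· + 1)) i
          = (fun i => decide (g < |(PySem.List.pyGetD (y :: t) i (0, 0)).1 - (PySem.List.pyGetD (y :: t) (i - 1) (0, 0)).1| ∨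
            g < |(PySem.List.pyGetD (y :: t) i (0, 0)).2 - (PySem.List.pyGetD (y :: t) (i - 1) (0, 0)).2|)) i := by
        intro i hi
        have hb := (PySem.List.mem_pyRange_one).1 hi
        have e1 : PySem.List.pyGetD (x :: y :: t) (i + 1) (0,0) = PySem.List.pyGetD (y :: t) i (0,0) :=
          pvGetD_cons_shift _ _ _ _ (by omega) (by simpa using hb.2)
        have e2 : PySem.List.pyGetD (x :: y :: t) (i + 1 - 1) (0,0) = PySem.List.pyGetD (y :: t) (i - 1) (0,0) := by
          have : i + 1 - 1 = (i - 1) + 1 := by ring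
          rw [this]
          exact pvGetD_cons_shift _ _ _ _ (by omega) (by simp at hb ⊢; omega)
        simp only [Function.comp_apply, e1, e2]
      rw [pvCutsI] at ih
      rw [List.filter_congr hcong, ih]
      -- head predicate value
      have hx0 : PySem.List.pyGetD (x :: y :: t) ((1:Int) - 1) (0,0) = x := by
        norm_num [PySem.List.pyGetD_zero_cons]
      have hx1 : PySem.List.pyGetD (x :: y :: t) (1:Int) (0,0) = y := by
        rw [PySem.List.pyGetD_eq_getElem _ _ (by omega) (by simp)]; rfl
      rw [hx0, hx1]
      by_cases hc : |y.1 - x.1| ≤ g ∧ |y.2 - x.2| ≤ g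
      · rw [if_neg (by simp; omega)]
        by_cases hr : (pvRun g y t).2 = []
        · simp [pvCutsN, pvRun, hc, hr]
        · simp [pvCutsN, pvRun, hc, hr]
          intro a _
          ring
      · rw [if_pos (by simp; omega)]
        by_cases hr : (pvRun g y t).2 = []
        · simp [pvCutsN, pvRun, hc, hr]
        · simp [pvCutsN, pvRun, hc, hr]
          intro a _
          ring

theorem B_segs (g : Int) : ∀ (N : Nat) (sp : List (Int × Int)), sp.length ≤ N → sp ≠ [] →
    ((0 :: pvCutsN g sp ++ [sp.length]).zip ((0 :: pvCutsN g sp ++ [sp.length]).drop 1)).map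
        (fun ab => (sp.drop ab.1).take (ab.2 - ab.1)) = pvSplit g sp ∧
    ∀ ab ∈ (0 :: pvCutsN g sp ++ [sp.length]).zip ((0 :: pvCutsN g sp ++ [sp.length]).drop 1),
      ab.1 ≤ ab.2 ∧ ab.2 ≤ sp.length := by
  intro N
  induction N with
  | zero =>
    intro sp h hne
    cases sp with
    | nil => exact absurd rfl hne
    | cons a l => simp at h
  | succ N ih =>
    rintro (_ | ⟨p, rest⟩) hlen hne
    · exact absurd rfl hne
    set c := (pvRun g p rest).1 with hc
    set r := (pvRun g p rest).2 with hr
    have hsplit : (p :: rest) = (p :: c) ++ r := by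
      simp [hc, hr, pvRun_append g p rest]
    have hlenrest : c.length + r.length = rest.length := by
      have := congrArg List.length (pvRun_append g p rest); simpa using this
    by_cases hre : r = []
    · -- single chain
      have hcuts : pvCutsN g (p :: rest) = [] := by rw [pvCutsN]; simp [← hc, ← hr, hre]
      have hsp : pvSplit g (p :: rest) = [p :: c] := by
        rw [pvSplit]; simp [← hc, ← hr, hre, pvSplit]
      rw [hcuts, hsp]
      constructor
      · have he : p :: rest = p :: c := by conv_lhs => rw [hsplit, hre, List.append_nil]
        simp only [List.cons_append, List.nil_append, List.zip_cons_cons, List.drop_succ_cons,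
          List.drop_zero, List.zip_nil_right, List.map_cons, List.map_nil]
        rw [Nat.sub_zero, List.take_length]
        exact congrArg (· :: []) he
      · intro ab hab
        simp at hab
        subst hab
        simp
    · -- r nonempty: first chain p :: c, then recurse on r
      have hcuts : pvCutsN g (p :: rest) = (c.length + 1) :: (pvCutsN g r).map (· + (c.length + 1)) := by
        rw [pvCutsN]; simp [← hc, ← hr, hre]
      have hsp : pvSplit g (p :: rest) = (p :: c) :: pvSplit g r := by rw [pvSplit]
      have hn : (p :: rest).length = (c.length + 1) + r.length := by simp; omega
      have hrlen : r.length ≤ N := by simp at hlen; omega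
      obtain ⟨ih1, ih2⟩ := ih r hrlen hre
      have hnb : (0 :: pvCutsN g (p :: rest) ++ [(p :: rest).length])
          = 0 :: (0 :: pvCutsN g r ++ [r.length]).map (· + (c.length + 1)) := by
        rw [hcuts, hn]
        simp [List.map_append, Nat.add_comm]
      have hzip : ((0 :: pvCutsN g (p :: rest) ++ [(p :: rest).length]).zip
            ((0 :: pvCutsN g (p :: rest) ++ [(p :: rest).length]).drop 1))
          = (0, c.length + 1) :: ((0 :: pvCutsN g r ++ [r.length]).zip
            ((0 :: pvCutsN g r ++ [r.length]).drop 1)).map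
              (Prod.map (· + (c.length + 1)) (· + (c.length + 1))) := by
        rw [hnb]
        simp only [List.map_cons, List.map_append, List.drop_succ_cons, List.drop_zero,
          Nat.zero_add, List.zip_cons_cons]
        rw [← List.zip_map]
        simp
      have hdrop : ∀ a : Nat, List.drop (a + (c.length + 1)) (p :: rest) = List.drop a r := by
        intro a
        conv_lhs => rw [hsplit]
        rw [Nat.add_comm, ← List.drop_drop]
        congr 1
        have : (c.length + 1) = (p :: c).length := by simp
        rw [this]
        exact List.drop_left ..
      have htake : List.take (c.length + 1) (p :: rest) = p :: c := by
        conv_lhs => rw [hsplit]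
        have : (c.length + 1) = (p :: c).length := by simp
        rw [this]
        exact List.take_left ..
      constructor
      · rw [hzip, hsp]
        simp only [List.map_cons]
        congr 1
        · rw [List.map_map, ← ih1]
          refine List.map_congr_left (fun ab _ => ?_)
          simp only [Function.comp_apply, Prod.map_fst, Prod.map_snd]
          rw [hdrop ab.1]
          congr 1
          omega
      · rw [hzip]
        intro ab hab
        rcases List.mem_cons.mp hab with h0 | hmem
        · subst h0; simp only [hn]; simp
        · simp only [List.mem_map] at hmem
          obtain ⟨ab', hab', rfl⟩ := hmem
          obtain ⟨h1, h2⟩ := ih2 ab' hab'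
          simp only [Prod.map_fst, Prod.map_snd]
          omega


-- the step function of A's inner loop (definitionally the lambda in port A)
def pvStepA (g m ori : Int) (st : List (Int × Int) × List (Int × (List (Int × Int)))) (p : Int × Int) :
    List (Int × Int) × List (Int × (List (Int × Int))) :=
  let last := PySem.List.pyGetD st.1 (-1) (0, 0)
  if |p.1 - last.1| ≤ g ∧ |p.2 - last.2| ≤ g then
    (st.1 ++ [p], st.2)
  else
    if m ≤ (st.1.length : Int) then ([p], st.2 ++ [(ori, st.1)]) else ([p], st.2)

theorem A_fold (g m ori : Int) :
    ∀ (rest cur : List (Int × Int)) (all : List (Int × (List (Int × Int)))) (h : cur ≠ []),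
    (if m ≤ (((rest.foldl (pvStepA g m ori) (cur, all)).1.length : Int)) then
        (rest.foldl (pvStepA g m ori) (cur, all)).2 ++ [(ori, (rest.foldl (pvStepA g m ori) (cur, all)).1)]
      else (rest.foldl (pvStepA g m ori) (cur, all)).2)
    = all ++ pvEmit m ori ((cur ++ (pvRun g (cur.getLast h) rest).1) ::
        pvSplit g (pvRun g (cur.getLast h) rest).2) := by
  intro rest
  induction rest with
  | nil =>
    intro cur all h
    simp only [List.foldl_nil, pvRun, pvSplit, pvEmit, List.append_nil]
    by_cases hm : m ≤ (cur.length : Int) <;> simp [hm]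
  | cons q qs ih =>
    intro cur all h
    rw [List.foldl_cons]
    have hlast : PySem.List.pyGetD cur (-1) (0, 0) = cur.getLast h :=
      PySem.List.pyGetD_neg_one cur (0, 0) h
    by_cases hcl : |q.1 - (cur.getLast h).1| ≤ g ∧ |q.2 - (cur.getLast h).2| ≤ g
    · -- gap small: extend the current chain
      have hstep : pvStepA g m ori (cur, all) q = (cur ++ [q], all) := by
        simp only [pvStepA, hlast]
        rw [if_pos hcl]
      rw [hstep, ih (cur ++ [q]) all (by simp)]
      have hgl : (cur ++ [q]).getLast (by simp) = q := List.getLast_concat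
      rw [hgl]
      have hrun : pvRun g (cur.getLast h) (q :: qs) =
          ((pvRun g q qs).1.cons q, (pvRun g q qs).2) := by
        rw [pvRun, if_pos hcl]
      rw [hrun]
      simp [List.append_assoc]
    · -- gap large: emit the current chain if long enough, restart
      have hstep : pvStepA g m ori (cur, all) q =
          ([q], if m ≤ (cur.length : Int) then all ++ [(ori, cur)] else all) := by
        simp only [pvStepA, hlast]
        rw [if_neg hcl]
        by_cases hm : m ≤ (cur.length : Int) <;> simp [hm]
      rw [hstep, ih [q] _ (by simp)]
      have hgl : ([q] : List (Int × Int)).getLast (by simp) = q := List.getLast_singleton _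
      rw [hgl]
      have hrun : pvRun g (cur.getLast h) (q :: qs) = ([], q :: qs) := by
        rw [pvRun, if_neg hcl]
      rw [hrun]
      rw [show pvSplit g (q :: qs) = (q :: (pvRun g q qs).1) :: pvSplit g (pvRun g q qs).2 from by rw [pvSplit]]
      simp only [List.append_nil, pvEmit, List.filter_cons]
      by_cases hm : m ≤ (cur.length : Int) <;> simp [hm, List.append_assoc]

-- per-bucket function of port A (definitionally the lambda in port A)
def pvAf (min_seeds max_gap : Int) (all_chains : List (Int × (List (Int × Int))))
    (bkt : Int × Int × List (Int × Int)) : List (Int × (List (Int × Int))) :=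
  let ori_flag := bkt.1
  let pairs := PySem.List.sorted2 bkt.2.2 (fun p => p.1) (fun p => p.2)
  match pairs with
  | [] => all_chains
  | p0 :: rest =>
    let st := rest.foldl (fun (st : List (Int × Int) × List (Int × (List (Int × Int)))) p =>
      let last := PySem.List.pyGetD st.1 (-1) (0, 0)
      if |p.1 - last.1| ≤ max_gap ∧ |p.2 - last.2| ≤ max_gap then
        (st.1 ++ [p], st.2)
      else
        if min_seeds ≤ (st.1.length : Int) then ([p], st.2 ++ [(ori_flag, st.1)])
        else ([p], st.2)) ([p0], all_chains)
    if min_seeds ≤ (st.1.length : Int) then st.2 ++ [(ori_flag, st.1)] else st.2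

theorem portA_eq (buckets : List (Int × Int × List (Int × Int))) (min_seeds max_gap : Int) :
    chain_all_buckets_local buckets min_seeds max_gap = buckets.foldl (pvAf min_seeds max_gap) [] := rfl

-- per-bucket function of port B (definitionally the lambda in port B)
def pvBf (min_seeds max_gap : Int) (all_chains : List (Int × (List (Int × Int))))
    (bkt : Int × Int × List (Int × Int)) : List (Int × (List (Int × Int))) :=
  let ori_flag := bkt.1
  let pairs := PySem.List.sorted2 bkt.2.2 (fun p => p.1) (fun p => p.2)
  let n : Int := (pairs.length : Int)
  let cuts := (PySem.List.pyRange 1 n 1).filter (fun i =>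
    decide (max_gap < |(PySem.List.pyGetD pairs i (0, 0)).1 - (PySem.List.pyGetD pairs (i - 1) (0, 0)).1| ∨
            max_gap < |(PySem.List.pyGetD pairs i (0, 0)).2 - (PySem.List.pyGetD pairs (i - 1) (0, 0)).2|))
  let bounds := 0 :: cuts ++ [n]
  all_chains ++ ((bounds.zip (bounds.drop 1)).filter (fun ab => decide (min_seeds ≤ ab.2 - ab.1))).map
    (fun ab => (ori_flag, PySem.List.slice pairs (some ab.1) (some ab.2)))

theorem portB_eq (buckets : List (Int × Int × List (Int × Int))) (min_seeds max_gap : Int) :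
    chain_all_buckets_local_alt buckets min_seeds max_gap = buckets.foldl (pvBf min_seeds max_gap) [] := rfl

theorem A_bucket (m g : Int) (bkt : Int × Int × List (Int × Int)) (all : List (Int × (List (Int × Int))))
    (h : PySem.List.sorted2 bkt.2.2 (fun p => p.1) (fun p => p.2) ≠ []) :
    pvAf m g all bkt = all ++ pvEmit m bkt.1 (pvSplit g (PySem.List.sorted2 bkt.2.2 (fun p => p.1) (fun p => p.2))) := by
  rcases hsp : PySem.List.sorted2 bkt.2.2 (fun p => p.1) (fun p => p.2) with _ | ⟨p0, rest⟩
  · exact absurd hsp h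
  · simp only [pvAf, hsp]
    have hf := A_fold g m bkt.1 rest [p0] all (by simp)
    rw [List.getLast_singleton] at hf
    rw [show pvSplit g (p0 :: rest) =
        (p0 :: (pvRun g p0 rest).1) :: pvSplit g (pvRun g p0 rest).2 from by rw [pvSplit]]
    simpa using hf

theorem emit_zip (m ori : Int) (sp : List (Int × Int)) :
    ∀ (zs : List (Nat × Nat)), (∀ ab ∈ zs, ab.1 ≤ ab.2 ∧ ab.2 ≤ sp.length) →
    ((zs.map (Prod.map (fun k : Nat => (k : Int)) (fun k : Nat => (k : Int)))).filter
        (fun ab => decide (m ≤ ab.2 - ab.1))).map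
      (fun ab => (ori, PySem.List.slice sp (some ab.1) (some ab.2)))
    = pvEmit m ori (zs.map (fun ab => List.take (ab.2 - ab.1) (List.drop ab.1 sp))) := by
  intro zs
  induction zs with
  | nil => intro _; simp [pvEmit]
  | cons ab zs ih =>
    intro hz
    obtain ⟨h1, h2⟩ := hz ab (by simp)
    have hih := ih (fun a ha => hz a (List.mem_cons_of_mem _ ha))
    have hlen : (List.take (ab.2 - ab.1) (List.drop ab.1 sp)).length = ab.2 - ab.1 := by
      simp [List.length_take, List.length_drop]; omega
    have hslice : PySem.List.slice sp (some ((ab.1 : Nat) : Int)) (some ((ab.2 : Nat) : Int))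
        = List.take (ab.2 - ab.1) (List.drop ab.1 sp) := PySem.List.slice_natCast sp ab.1 ab.2
    by_cases hm : m ≤ ((ab.2 : Int)) - ((ab.1 : Int))
    · have hm' : m ≤ ((List.take (ab.2 - ab.1) (List.drop ab.1 sp)).length : Int) := by
        rw [hlen]; omega
      simp only [pvEmit] at hih
      simp only [List.map_cons, Prod.map_fst, Prod.map_snd, List.filter_cons, pvEmit]
      rw [if_pos (by simpa using hm), if_pos (by simpa using hm'), List.map_cons, List.map_cons]
      simp only [Prod.map_fst, Prod.map_snd]
      rw [hslice, hih]
    · have hm' : ¬ m ≤ ((List.take (ab.2 - ab.1) (List.drop ab.1 sp)).length : Int) := by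
        rw [hlen]; omega
      simp only [pvEmit] at hih
      simp only [List.map_cons, Prod.map_fst, Prod.map_snd, List.filter_cons, pvEmit]
      rw [if_neg (by simpa using hm), if_neg (by simpa using hm')]
      exact hih

theorem B_bucket (m g : Int) (bkt : Int × Int × List (Int × Int)) (all : List (Int × (List (Int × Int))))
    (h : PySem.List.sorted2 bkt.2.2 (fun p => p.1) (fun p => p.2) ≠ []) :
    pvBf m g all bkt = all ++ pvEmit m bkt.1 (pvSplit g (PySem.List.sorted2 bkt.2.2 (fun p => p.1) (fun p => p.2))) := by
  set sp := PySem.List.sorted2 bkt.2.2 (fun p => p.1) (fun p => p.2) with hspdef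
  obtain ⟨hs1, hs2⟩ := B_segs g sp.length sp le_rfl h
  simp only [pvBf, ← hspdef]
  congr 1
  rw [show (PySem.List.pyRange 1 (sp.length : Int) 1).filter (fun i =>
      decide (g < |(PySem.List.pyGetD sp i (0, 0)).1 - (PySem.List.pyGetD sp (i - 1) (0, 0)).1| ∨
              g < |(PySem.List.pyGetD sp i (0, 0)).2 - (PySem.List.pyGetD sp (i - 1) (0, 0)).2|))
      = pvCutsI g sp from rfl]
  rw [cutsI_eq_cutsN]
  have hb : ((0 : Int) :: (pvCutsN g sp).map (fun k : Nat => (k : Int)) ++ [((sp.length : Nat) : Int)])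
      = ((0 :: pvCutsN g sp ++ [sp.length]).map (fun k : Nat => (k : Int))) := by simp
  rw [hb, ← List.map_drop, List.zip_map]
  rw [emit_zip m bkt.1 sp _ hs2, hs1]

theorem top_eq (m g : Int) : ∀ (buckets : List (Int × Int × List (Int × Int)))
    (all : List (Int × (List (Int × Int)))), (∀ b ∈ buckets, b.2.2 ≠ []) →
    buckets.foldl (pvAf m g) all = buckets.foldl (pvBf m g) all := by
  intro buckets
  induction buckets with
  | nil => intro all _; rfl
  | cons b bs ih =>
    intro all hne
    have hb : PySem.List.sorted2 b.2.2 (fun p => p.1) (fun p => p.2) ≠ [] := by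
      intro hs
      have hperm := PySem.List.sorted2_perm b.2.2 (fun p => p.1) (fun p => p.2) false
      rw [hs] at hperm
      exact (hne b (by simp)) hperm.symm.eq_nil
    rw [List.foldl_cons, List.foldl_cons, A_bucket m g b all hb, B_bucket m g b all hb]
    exact ih _ (fun x hx => hne x (List.mem_cons_of_mem _ hx))

-- ===== VERDICT (by name: the statement is the Claim_ definition above) =====
theorem chain_all_buckets_local_spec : Claim_equal_chain_all_buckets_local := by
  intro buckets min_seeds max_gap _ hpre
  unfold Spec_chain_all_buckets_local
  rw [portA_eq, portB_eq]
  exact top_eq min_seeds max_gap buckets [] hpre.1
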